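-- pv_equiv track=rewrite | github.com/D4rk3l/interactive-text-games-hacktoberfest | text-love-calculator/text-love-calculator.py | calc_love_percentage
-- ===== SOURCE A (Python) =====
-- def calc_love_percentage(list_of_counts):
--     '''Recursive function to calculate love percentage'''
--
--     # Exit case
--     if len(list_of_counts) == 2:
--         return str(list_of_counts[0]) + str(list_of_counts[1])
--
--     # Add terms outside to inside
--     new_counts = []
--     midpoint = len(list_of_counts) // 2
--     for term in range(midpoint):
--         temp_count = list_of_counts[term] + list_of_counts[len(list_of_counts)-1-term]
--         new_counts.append(temp_count)
--
--     # Drop the middle term if len is odd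
--     if len(list_of_counts) % 2 > 0:
--         middle_term = (len(list_of_counts) // 2)
--         new_counts.append(list_of_counts[middle_term])
--
--     # Recurse.
--     percentage = calc_love_percentage(new_counts)
--     return percentage
-- ===== SOURCE B (Python) =====
-- def calc_love_percentage(list_of_counts):
--     '''Compute the same two final numbers by tracing each element's
--     position through the folding process independently, accumulating
--     it into one of two running sums.'''
--     n0 = len(list_of_counts)
--     left = 0
--     right = 0
--     for i, v in enumerate(list_of_counts):
--         pos, n = i, n0
--         while n != 2:
--             half = n // 2
--             if pos >= n - half:
--                 pos = n - 1 - pos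
--             n = half + (n % 2)
--         if pos == 0:
--             left += v
--         else:
--             right += v
--     return str(left) + str(right)
-- ===== Notes on version B (the rewrite author's own statement) =====
-- stated objective: alternative
-- what changed: Instead of repeatedly folding the whole list (summing outer pairs) until two numbers remain, B traces each element's index through the fold rounds independently to find which of the two final slots it lands in, and accumulates it into one of two running sums in a single pass over the input.
import Mathlib
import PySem

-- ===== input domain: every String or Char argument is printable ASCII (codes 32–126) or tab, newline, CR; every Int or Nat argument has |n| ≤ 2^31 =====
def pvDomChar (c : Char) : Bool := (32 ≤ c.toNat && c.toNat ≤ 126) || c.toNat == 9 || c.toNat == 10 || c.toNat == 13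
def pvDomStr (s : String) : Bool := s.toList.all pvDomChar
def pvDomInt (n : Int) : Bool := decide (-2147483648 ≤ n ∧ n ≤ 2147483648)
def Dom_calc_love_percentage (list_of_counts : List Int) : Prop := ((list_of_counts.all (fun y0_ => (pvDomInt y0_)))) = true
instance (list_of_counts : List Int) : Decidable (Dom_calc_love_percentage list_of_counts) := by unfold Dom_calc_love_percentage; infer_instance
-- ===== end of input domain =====

-- B recomputes A's fold result by tracing each element's final slot independently (different
-- algorithm, same cost class); equivalence is about the return value on lists of length ≥ 2.

-- ===== PORT A =====
-- A recurses on the folded list; fuel = initial length bounds the recursion depth (the fold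
-- shrinks the list each round, so the fuel is never exhausted when the length is ≥ 2).
def pvCalcAux : Nat → List Int → String
  | 0, _ => ""
  | fuel+1, list_of_counts =>
    if list_of_counts.length = 2 then
      PySem.Int.toStr (PySem.List.pyGetD list_of_counts 0 0) ++
        PySem.Int.toStr (PySem.List.pyGetD list_of_counts 1 0)
    else
      let midpoint : Nat := list_of_counts.length / 2
      let new_counts : List Int := (List.range midpoint).foldl
        (fun (acc : List Int) (term : Nat) =>
          acc ++ [PySem.List.pyGetD list_of_counts (term : Int) 0 +
                  PySem.List.pyGetD list_of_counts ((list_of_counts.length : Int) - 1 - (term : Int)) 0]) []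
      let new_counts : List Int :=
        if list_of_counts.length % 2 > 0 then
          new_counts ++ [PySem.List.pyGetD list_of_counts (midpoint : Int) 0]
        else new_counts
      pvCalcAux fuel new_counts

def calc_love_percentage (list_of_counts : List Int) : String :=
  pvCalcAux list_of_counts.length list_of_counts

-- ===== PORT B =====
-- per-element while-loop of Source B; fuel = initial length bounds the iterations.
def pvTrajAux : Nat → Int → Int → Int
  | 0, _, pos => pos
  | fuel+1, n, pos =>
    if n = 2 then pos
    else
      let half := PySem.Int.floordiv n 2
      let pos' := if pos ≥ n - half then n - 1 - pos else pos
      pvTrajAux fuel (half + PySem.Int.mod n 2) pos'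

def calc_love_percentage_alt (list_of_counts : List Int) : String :=
  let n0 : Int := list_of_counts.length
  let lr : Int × Int := (PySem.List.enumerate list_of_counts).foldl
    (fun (lr : Int × Int) (iv : Int × Int) =>
      let pos := pvTrajAux list_of_counts.length n0 iv.1
      if pos = 0 then (lr.1 + iv.2, lr.2) else (lr.1, lr.2 + iv.2))
    (0, 0)
  PySem.Int.toStr lr.1 ++ PySem.Int.toStr lr.2

-- ===== PRECONDITION & SPEC =====
-- A raises RecursionError (and B's while-loop would not terminate) on lists of length 0 or 1.
def Pre_calc_love_percentage (list_of_counts : List Int) : Prop := 2 ≤ list_of_counts.length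
instance (list_of_counts : List Int) : Decidable (Pre_calc_love_percentage list_of_counts) := by
  unfold Pre_calc_love_percentage; infer_instance

def pvWitness_calc_love_percentage : List Int := [1, 2, 3, 4, 5]

def Spec_calc_love_percentage (list_of_counts : List Int) (out : String) : Prop := out = calc_love_percentage_alt list_of_counts
instance (list_of_counts : List Int) (out : String) : Decidable (Spec_calc_love_percentage list_of_counts out) := by unfold Spec_calc_love_percentage; infer_instance

-- ===== CLAIM (what is proved, stated in full; the proofs are below) =====
def Claim_equal_calc_love_percentage : Prop := ∀ (list_of_counts : List Int), Dom_calc_love_percentage list_of_counts → Pre_calc_love_percentage list_of_counts → Spec_calc_love_percentage list_of_counts (calc_love_percentage list_of_counts)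

-- ===== LEMMAS AND PROOFS =====

-- Nat-valued version of the per-element trajectory.
def pvTrajN : Nat → Nat → Nat → Nat
  | 0, _, pos => pos
  | fuel+1, n, pos =>
    if n = 2 then pos
    else
      let half := n / 2
      let pos' := if n - half ≤ pos then n - 1 - pos else pos
      pvTrajN fuel (half + n % 2) pos'

-- the final slot (0 = left, 1 = right) of index i in a list of length n
def pvSlot (n i : Nat) : Nat := pvTrajN n n i

-- one fold round of A, in clean map form
def pvStep (xs : List Int) : List Int :=
  (List.range (xs.length / 2)).map
    (fun t => xs.getD t 0 + xs.getD (xs.length - 1 - t) 0) ++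
  (if xs.length % 2 > 0 then [xs.getD (xs.length / 2) 0] else [])

def pvSsum (F : Nat → Int → Int) (xs : List Int) : Int :=
  ∑ i ∈ Finset.range xs.length, F (pvSlot xs.length i) (xs.getD i 0)

def pvF0 : Nat → Int → Int := fun s v => if s = 0 then v else 0
def pvF1 : Nat → Int → Int := fun s v => if s = 0 then 0 else v

theorem pvTrajAux_eq_trajN (fuel : Nat) : ∀ (n pos : Nat), pos < n →
    pvTrajAux fuel (n : Int) (pos : Int) = ((pvTrajN fuel n pos : Nat) : Int) := by
  induction fuel with
  | zero => intro n pos _; rfl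
  | succ fuel ih =>
    intro n pos hpos
    simp only [pvTrajAux, pvTrajN]
    by_cases h2 : n = 2
    · simp [h2]
    · have hn2 : ¬ ((n : Int) = 2) := by exact_mod_cast h2
      rw [if_neg hn2, if_neg h2]
      have hfd : PySem.Int.floordiv (n : Int) 2 = ((n / 2 : Nat) : Int) := by
        exact_mod_cast PySem.Int.floordiv_natCast n 2
      have hmd : PySem.Int.mod (n : Int) 2 = ((n % 2 : Nat) : Int) := by
        exact_mod_cast PySem.Int.mod_natCast n 2
      rw [hfd, hmd]
      by_cases hc : n - n / 2 ≤ pos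
      · rw [if_pos (by omega), if_pos hc]
        have h1 : (n : Int) - 1 - (pos : Int) = ((n - 1 - pos : Nat) : Int) := by omega
        have h2' : ((n / 2 : Nat) : Int) + ((n % 2 : Nat) : Int) = ((n / 2 + n % 2 : Nat) : Int) := by
          push_cast; ring
        rw [h1, h2']
        exact ih _ _ (by omega)
      · rw [if_neg (by omega), if_neg hc]
        have h2' : ((n / 2 : Nat) : Int) + ((n % 2 : Nat) : Int) = ((n / 2 + n % 2 : Nat) : Int) := by
          push_cast; ring
        rw [h2']
        exact ih _ _ (by omega)

theorem pvTrajN_fuel (fuel₁ : Nat) : ∀ (fuel₂ n pos : Nat), 2 ≤ n → n ≤ fuel₁ → n ≤ fuel₂ →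
    pvTrajN fuel₁ n pos = pvTrajN fuel₂ n pos := by
  induction fuel₁ with
  | zero => intro fuel₂ n pos h2 h1 _; omega
  | succ fuel ih =>
    intro fuel₂ n pos h2 h1 hf2
    obtain ⟨f2, rfl⟩ : ∃ f2, fuel₂ = f2 + 1 := ⟨fuel₂ - 1, by omega⟩
    simp only [pvTrajN]
    by_cases hn : n = 2
    · simp [hn]
    · rw [if_neg hn, if_neg hn]
      by_cases hc : n - n / 2 ≤ pos
      · rw [if_pos hc]; exact ih _ _ _ (by omega) (by omega) (by omega)
      · rw [if_neg hc]; exact ih _ _ _ (by omega) (by omega) (by omega)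

-- the index map of one fold round
def pvIdxMap (n i : Nat) : Nat := if n - n / 2 ≤ i then n - 1 - i else i

theorem pvSlot_step (n i : Nat) (h3 : 3 ≤ n) (hi : i < n) :
    pvSlot n i = pvSlot (n / 2 + n % 2) (pvIdxMap n i) := by
  unfold pvSlot pvIdxMap
  obtain ⟨f, rfl⟩ : ∃ f, n = f + 1 := ⟨n - 1, by omega⟩
  have h1 : pvTrajN (f + 1) (f + 1) i = pvTrajN f ((f + 1) / 2 + (f + 1) % 2)
      (if (f + 1) - (f + 1) / 2 ≤ i then (f + 1) - 1 - i else i) := by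
    simp only [pvTrajN]
    rw [if_neg (by omega)]
  rw [h1]
  exact pvTrajN_fuel f _ _ _ (by omega) (by omega) (by omega)

theorem pvIdxMap_lo (n j : Nat) (hj : j < n / 2) : pvIdxMap n j = j := by
  unfold pvIdxMap; rw [if_neg]; omega

theorem pvIdxMap_hi (n j : Nat) (h3 : 3 ≤ n) (hj : j < n / 2) : pvIdxMap n (n - 1 - j) = j := by
  unfold pvIdxMap; rw [if_pos (by omega)]; omega

theorem pvIdxMap_mid (n : Nat) (hodd : n % 2 = 1) : pvIdxMap n (n / 2) = n / 2 := by
  unfold pvIdxMap; rw [if_neg]; omega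

theorem pvStep_length (xs : List Int) :
    (pvStep xs).length = xs.length / 2 + xs.length % 2 := by
  unfold pvStep
  by_cases h : xs.length % 2 > 0 <;> simp [h] <;> omega

theorem pvStep_getD_lo (xs : List Int) (j : Nat) (hj : j < xs.length / 2) :
    (pvStep xs).getD j 0 = xs.getD j 0 + xs.getD (xs.length - 1 - j) 0 := by
  unfold pvStep
  rw [List.getD_append _ _ _ _ (by simpa using hj)]
  rw [List.getD_eq_getElem?_getD]
  simp [hj]

theorem pvStep_getD_mid (xs : List Int) (hodd : xs.length % 2 = 1) :
    (pvStep xs).getD (xs.length / 2) 0 = xs.getD (xs.length / 2) 0 := by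
  unfold pvStep
  rw [List.getD_eq_getElem?_getD, List.getElem?_append_right (by simp)]
  simp [hodd]

theorem pvRange_split (t : Nat → Int) (h k : Nat) :
    ∑ i ∈ Finset.range (h + k % 2), t i =
      (∑ i ∈ Finset.range h, t i) + (if k % 2 > 0 then t h else 0) := by
  rcases Nat.mod_two_eq_zero_or_one k with hp | hp <;> simp [hp, Finset.sum_range_succ]

theorem pvSsum_step (F : Nat → Int → Int)
    (hadd : ∀ s a b, F s (a + b) = F s a + F s b)
    (xs : List Int) (h3 : 3 ≤ xs.length) :
    pvSsum F (pvStep xs) = pvSsum F xs := by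
  have hm : (pvStep xs).length = xs.length / 2 + xs.length % 2 := pvStep_length xs
  have hL : pvSsum F (pvStep xs) =
      (∑ j ∈ Finset.range (xs.length / 2),
        (F (pvSlot xs.length j) (xs.getD j 0) +
         F (pvSlot xs.length (xs.length - 1 - j)) (xs.getD (xs.length - 1 - j) 0))) +
      (if xs.length % 2 > 0 then
        F (pvSlot xs.length (xs.length / 2)) (xs.getD (xs.length / 2) 0) else 0) := by
    unfold pvSsum
    rw [hm, pvRange_split]
    congr 1
    · refine Finset.sum_congr rfl (fun j hj => ?_)
      have hj' : j < xs.length / 2 := Finset.mem_range.mp hj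
      rw [pvStep_getD_lo xs j hj', hadd]
      have e1 : pvSlot (xs.length / 2 + xs.length % 2) j = pvSlot xs.length j := by
        rw [pvSlot_step xs.length j h3 (by omega), pvIdxMap_lo _ _ hj']
      have e2 : pvSlot (xs.length / 2 + xs.length % 2) j
          = pvSlot xs.length (xs.length - 1 - j) := by
        rw [pvSlot_step xs.length (xs.length - 1 - j) h3 (by omega), pvIdxMap_hi _ _ h3 hj']
      rw [← e1, ← e2]
    · by_cases hodd : xs.length % 2 > 0
      · rw [if_pos hodd, pvStep_getD_mid xs (by omega)]
        have e3 : pvSlot (xs.length / 2 + xs.length % 2) (xs.length / 2)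
            = pvSlot xs.length (xs.length / 2) := by
          rw [pvSlot_step xs.length (xs.length / 2) h3 (by omega), pvIdxMap_mid _ (by omega)]
        rw [e3, if_pos hodd]
      · rw [if_neg hodd, if_neg hodd]
  have hrefl : ∑ j ∈ Finset.range (xs.length / 2),
        F (pvSlot xs.length (xs.length - 1 - j)) (xs.getD (xs.length - 1 - j) 0)
      = ∑ i ∈ Finset.Ico (xs.length / 2 + xs.length % 2) xs.length,
        F (pvSlot xs.length i) (xs.getD i 0) := by
    refine Finset.sum_nbij' (fun j => xs.length - 1 - j) (fun i => xs.length - 1 - i)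
      ?_ ?_ ?_ ?_ (fun a ha => rfl)
    all_goals
      intro a ha
      simp only [Finset.mem_range, Finset.mem_Ico] at *
      omega
  have hsplit : pvSsum F xs =
      (∑ i ∈ Finset.range (xs.length / 2 + xs.length % 2),
        F (pvSlot xs.length i) (xs.getD i 0)) +
      ∑ i ∈ Finset.Ico (xs.length / 2 + xs.length % 2) xs.length,
        F (pvSlot xs.length i) (xs.getD i 0) := by
    unfold pvSsum
    rw [Finset.range_eq_Ico,
      ← Finset.sum_Ico_consecutive _ (Nat.zero_le (xs.length / 2 + xs.length % 2))
        (by omega : xs.length / 2 + xs.length % 2 ≤ xs.length)]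
  rw [hL, Finset.sum_add_distrib, hrefl, hsplit, pvRange_split]
  ring

theorem pvF0_add (s : Nat) (a b : Int) : pvF0 s (a + b) = pvF0 s a + pvF0 s b := by
  unfold pvF0; split <;> simp

theorem pvF1_add (s : Nat) (a b : Int) : pvF1 s (a + b) = pvF1 s a + pvF1 s b := by
  unfold pvF1; split <;> simp

-- A's inline loop builds exactly pvStep
theorem pvNew_counts_eq (xs : List Int) :
    ((if xs.length % 2 > 0 then
        ((List.range (xs.length / 2)).foldl
          (fun (acc : List Int) (term : Nat) =>
            acc ++ [PySem.List.pyGetD xs (term : Int) 0 +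
                    PySem.List.pyGetD xs ((xs.length : Int) - 1 - (term : Int)) 0]) [])
          ++ [PySem.List.pyGetD xs ((xs.length / 2 : Nat) : Int) 0]
      else
        ((List.range (xs.length / 2)).foldl
          (fun (acc : List Int) (term : Nat) =>
            acc ++ [PySem.List.pyGetD xs (term : Int) 0 +
                    PySem.List.pyGetD xs ((xs.length : Int) - 1 - (term : Int)) 0]) [])) : List Int)
    = pvStep xs := by
  have hmap : ((List.range (xs.length / 2)).foldl
      (fun (acc : List Int) (term : Nat) =>
        acc ++ [PySem.List.pyGetD xs (term : Int) 0 +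
                PySem.List.pyGetD xs ((xs.length : Int) - 1 - (term : Int)) 0]) [])
      = (List.range (xs.length / 2)).map
        (fun t => xs.getD t 0 + xs.getD (xs.length - 1 - t) 0) := by
    rw [PySem.List.foldl_append_singleton_eq_map
          (fun (term : Nat) =>
            PySem.List.pyGetD xs (term : Int) 0 +
            PySem.List.pyGetD xs ((xs.length : Int) - 1 - (term : Int)) 0)
          (List.range (xs.length / 2)) []]
    rw [List.nil_append]
    refine List.map_congr_left (fun t ht => ?_)
    have ht' : t < xs.length / 2 := List.mem_range.mp ht
    have e : (xs.length : Int) - 1 - (t : Int) = ((xs.length - 1 - t : Nat) : Int) := by omega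
    rw [e, PySem.List.pyGetD_natCast, PySem.List.pyGetD_natCast]
  unfold pvStep
  by_cases hodd : xs.length % 2 > 0
  · rw [if_pos hodd, if_pos hodd, hmap, PySem.List.pyGetD_natCast]
  · rw [if_neg hodd, if_neg hodd, hmap, List.append_nil]

theorem pvA_eq (fuel : Nat) : ∀ (xs : List Int), 2 ≤ xs.length → xs.length ≤ fuel →
    pvCalcAux fuel xs = PySem.Int.toStr (pvSsum pvF0 xs) ++ PySem.Int.toStr (pvSsum pvF1 xs) := by
  induction fuel with
  | zero => intro xs h2 hle; omega
  | succ fuel ih =>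
    intro xs h2 hle
    by_cases hl : xs.length = 2
    · obtain ⟨x, y, rfl⟩ := List.length_eq_two.mp hl
      have e0 : pvSsum pvF0 [x, y] = x := by
        unfold pvSsum
        simp [Finset.sum_range_succ, pvSlot, pvTrajN, pvF0]
      have e1 : pvSsum pvF1 [x, y] = y := by
        unfold pvSsum
        simp [Finset.sum_range_succ, pvSlot, pvTrajN, pvF1]
      rw [e0, e1]
      simp only [pvCalcAux, List.length_cons, List.length_nil]
      rfl
    · have h3 : 3 ≤ xs.length := by omega
      have hstep : pvCalcAux (fuel + 1) xs = pvCalcAux fuel (pvStep xs) := by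
        simp only [pvCalcAux]
        rw [if_neg hl]
        rw [pvNew_counts_eq xs]
      rw [hstep, ih (pvStep xs) (by rw [pvStep_length]; omega)
            (by rw [pvStep_length]; omega),
          pvSsum_step pvF0 pvF0_add xs h3, pvSsum_step pvF1 pvF1_add xs h3]

theorem pvFold_pair (g : Int → Int) (l : List (Int × Int)) : ∀ (a b : Int),
    (l.foldl (fun (lr : Int × Int) (iv : Int × Int) =>
        if g iv.1 = 0 then (lr.1 + iv.2, lr.2) else (lr.1, lr.2 + iv.2)) (a, b))
    = (a + (l.map (fun p => if g p.1 = 0 then p.2 else 0)).sum,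
       b + (l.map (fun p => if g p.1 = 0 then 0 else p.2)).sum) := by
  induction l with
  | nil => intro a b; simp
  | cons p tl ih =>
    intro a b
    rw [List.foldl_cons]
    by_cases hg : g p.1 = 0
    · rw [if_pos hg, ih]
      refine Prod.ext ?_ ?_ <;> simp [hg] <;> ring
    · rw [if_neg hg, ih]
      refine Prod.ext ?_ ?_ <;> simp [hg] <;> ring

theorem pvEnum_map_sum (G : Int → Int → Int) (xs : List Int) : ∀ (s : Int),
    ((PySem.List.enumerate xs s).map (fun p => G p.1 p.2)).sum
      = ∑ k ∈ Finset.range xs.length, G (s + (k : Int)) (xs.getD k 0) := by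
  induction xs with
  | nil => intro s; simp [PySem.List.enumerate]
  | cons x tl ih =>
    intro s
    rw [PySem.List.enumerate_cons, List.map_cons, List.sum_cons, ih (s + 1)]
    rw [List.length_cons, Finset.sum_range_succ']
    simp only [List.getD_cons_succ, List.getD_cons_zero]
    have : ∀ k : Nat, s + 1 + (k : Int) = s + ((k + 1 : Nat) : Int) := by
      intro k; push_cast; ring
    rw [Finset.sum_congr rfl (fun k _ => by rw [this k])]
    push_cast
    ring

theorem pvB_eq (xs : List Int) :
    calc_love_percentage_alt xs
      = PySem.Int.toStr (pvSsum pvF0 xs) ++ PySem.Int.toStr (pvSsum pvF1 xs) := by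
  simp only [calc_love_percentage_alt]
  rw [pvFold_pair (fun i => pvTrajAux xs.length (xs.length : Int) i)]
  dsimp only
  rw [pvEnum_map_sum (fun a b => if pvTrajAux xs.length (xs.length : Int) a = 0 then b else 0) xs 0,
      pvEnum_map_sum (fun a b => if pvTrajAux xs.length (xs.length : Int) a = 0 then 0 else b) xs 0]
  have hc : ∀ k ∈ Finset.range xs.length,
      (if pvTrajAux xs.length (xs.length : Int) ((0 : Int) + (k : Int)) = 0 then xs.getD k 0 else 0)
        = pvF0 (pvSlot xs.length k) (xs.getD k 0) := by
    intro k hk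
    have hk' : k < xs.length := Finset.mem_range.mp hk
    rw [zero_add, pvTrajAux_eq_trajN xs.length xs.length k hk']
    unfold pvF0 pvSlot
    by_cases h : pvTrajN xs.length xs.length k = 0
    · rw [if_pos h, if_pos (by exact_mod_cast h)]
    · rw [if_neg h, if_neg (by exact_mod_cast h)]
  have hc1 : ∀ k ∈ Finset.range xs.length,
      (if pvTrajAux xs.length (xs.length : Int) ((0 : Int) + (k : Int)) = 0 then 0 else xs.getD k 0)
        = pvF1 (pvSlot xs.length k) (xs.getD k 0) := by
    intro k hk
    have hk' : k < xs.length := Finset.mem_range.mp hk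
    rw [zero_add, pvTrajAux_eq_trajN xs.length xs.length k hk']
    unfold pvF1 pvSlot
    by_cases h : pvTrajN xs.length xs.length k = 0
    · rw [if_pos h, if_pos (by exact_mod_cast h)]
    · rw [if_neg h, if_neg (by exact_mod_cast h)]
  rw [Finset.sum_congr rfl hc, Finset.sum_congr rfl hc1]
  unfold pvSsum
  rw [zero_add, zero_add]

-- ===== VERDICT (by name: the statement is the Claim_ definition above) =====
theorem calc_love_percentage_spec : Claim_equal_calc_love_percentage := by
  intro xs _ hpre
  unfold Spec_calc_love_percentage
  rw [pvB_eq]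
  exact pvA_eq xs.length xs hpre le_rfl
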